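-- pv_equiv track=rewrite | github.com/gtakacse/advent-of-tdd | src/python/day04/day04.py | part_2
-- ===== SOURCE A (Python) =====
-- from collections import defaultdict
--
-- def part_2(cards):
--     score = defaultdict(int)
--     for i, (winner, me) in enumerate(cards):
--         score[i] += 1
--         common = len(me & winner)
--         for ii in range(common):
--             score[i + ii + 1] += score[i]
--
--     n = len(cards)
--     return sum(map(lambda kv: kv[1], filter(lambda kv: kv[0] < n, score.items())))
-- ===== SOURCE B (Python) =====
-- def part_2(cards):
--     # Difference-array range updates + running prefix sum: O(n) bookkeeping per card
--     # instead of A's per-copy inner loop over the dict.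
--     n = len(cards)
--     diff = [0] * (n + 1)
--     run = 0
--     total = 0
--     for i, (winner, me) in enumerate(cards):
--         run += diff[i]
--         c = 1 + run
--         total += c
--         common = len(me & winner)
--         lo = i + 1
--         hi = min(n, i + common + 1)
--         if lo < hi:
--             diff[lo] += c
--             diff[hi] -= c
--     return total
-- ===== Notes on version B (the rewrite author's own statement) =====
-- stated objective: alternative
-- what changed: Replaces A's defaultdict with a per-winning-card inner loop (score[i+ii+1] += score[i] for each of the `common` following cards) by a difference array with O(1) range updates and a running prefix sum, removing the inner loop; it trades the dict bookkeeping for a fixed-size array.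
import Mathlib
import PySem

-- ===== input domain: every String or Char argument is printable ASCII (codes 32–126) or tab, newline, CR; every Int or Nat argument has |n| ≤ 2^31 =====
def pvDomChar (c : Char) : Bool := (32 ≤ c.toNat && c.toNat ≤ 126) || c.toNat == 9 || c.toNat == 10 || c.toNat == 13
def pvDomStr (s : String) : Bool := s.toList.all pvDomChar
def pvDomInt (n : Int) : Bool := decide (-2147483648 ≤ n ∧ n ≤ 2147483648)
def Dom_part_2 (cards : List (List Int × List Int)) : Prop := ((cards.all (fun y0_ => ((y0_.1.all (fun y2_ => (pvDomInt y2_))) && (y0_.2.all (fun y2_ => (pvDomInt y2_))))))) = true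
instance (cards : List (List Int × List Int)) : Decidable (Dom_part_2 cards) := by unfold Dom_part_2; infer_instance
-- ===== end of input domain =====

-- B replaces A's per-copy inner loop over a defaultdict by a difference-array range
-- update with a running prefix sum (no inner loop); same return value on every input.

-- len(me & winner): both Pythons receive sets, so the count is over distinct elements.
def wCount (c : List Int × List Int) : Nat :=
  (PySem.Set.inter (PySem.Set.ofList c.2) c.1).length

-- ===== PORT A =====
-- inner loop: `for ii in range(common): score[i + ii + 1] += score[i]`
def aInner (k : Nat) (common : Int) (score : PySem.Dict Int Int) : PySem.Dict Int Int :=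
  (PySem.List.pyRange 0 common 1).foldl
    (fun sc ii => sc.insert ((k : Int) + ii + 1) (sc.getD ((k : Int) + ii + 1) 0 + sc.getD (k : Int) 0))
    score

-- outer loop: `for i, (winner, me) in enumerate(cards): score[i] += 1; …`
def aLoop : PySem.Dict Int Int → Nat → List (List Int × List Int) → PySem.Dict Int Int
  | score, _, [] => score
  | score, k, c :: rest =>
      aLoop (aInner k ((wCount c : Nat) : Int) (score.insert (k : Int) (score.getD (k : Int) 0 + 1))) (k + 1) rest

def part_2 (cards : List (List Int × List Int)) : Int :=
  let score := aLoop PySem.Dict.empty 0 cards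
  let n : Int := (cards.length : Int)
  ((score.items.filter (fun kv => decide (kv.1 < n))).map (fun kv => kv.2)).sum

-- ===== PORT B =====
-- one step per card: read the running prefix sum, emit the count, post a range update [lo, hi)
def bLoop : List Int → Int → Int → Nat → Nat → List (List Int × List Int) → Int
  | _, _, total, _, _, [] => total
  | diff, run, total, k, n, c :: rest =>
      let run1 := run + diff.getD k 0
      let cv := 1 + run1
      let total1 := total + cv
      let lo := k + 1
      let hi := min n (k + wCount c + 1)
      let diff1 :=
        if lo < hi then
          let d2 := diff.set lo (diff.getD lo 0 + cv)
          d2.set hi (d2.getD hi 0 - cv)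
        else diff
      bLoop diff1 run1 total1 (k + 1) n rest

def part_2_alt (cards : List (List Int × List Int)) : Int :=
  bLoop (List.replicate (cards.length + 1) 0) 0 0 0 cards.length cards

-- ===== PRECONDITION & SPEC =====
def Spec_part_2 (cards : List (List Int × List Int)) (out : Int) : Prop := out = part_2_alt cards
instance (cards : List (List Int × List Int)) (out : Int) : Decidable (Spec_part_2 cards out) := by unfold Spec_part_2; infer_instance

-- ===== CLAIM (what is proved, stated in full; the proofs are below) =====
def Claim_equal_part_2 : Prop := ∀ (cards : List (List Int × List Int)), Dom_part_2 cards → Spec_part_2 cards (part_2 cards)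

-- ===== LEMMAS AND PROOFS =====

-- The common model: cnt ws j = final number of copies of card j
-- (1 original + one copy per earlier card i < j whose win count reaches j, i.e. j ≤ i + ws i).
def cnt (ws : List Nat) (j : Nat) : Int :=
  1 + ∑ i ∈ (Finset.range j).attach, (if j ≤ i.1 + ws.getD i.1 0 then cnt ws i.1 else 0)
termination_by j
decreasing_by exact Finset.mem_range.mp i.2

-- partial contribution to slot j from the first k cards
def P (ws : List Nat) (k j : Nat) : Int :=
  ∑ i ∈ Finset.range k, (if j ≤ i + ws.getD i 0 then cnt ws i else 0)

lemma cnt_eq (ws : List Nat) (j : Nat) : cnt ws j = 1 + P ws j j := by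
  rw [cnt, P]
  exact congrArg (1 + ·) (Finset.sum_attach (Finset.range j) (fun i => if j ≤ i + ws.getD i 0 then cnt ws i else 0))

lemma P_succ (ws : List Nat) (k j : Nat) :
    P ws (k + 1) j = P ws k j + (if j ≤ k + ws.getD k 0 then cnt ws k else 0) := by
  rw [P, P, Finset.sum_range_succ]

-- max key ever touched (exclusive) after the first k cards
def Mx (ws : List Nat) (k : Nat) : Nat :=
  (List.range k).foldl (fun m i => max m (i + ws.getD i 0 + 1)) 0

lemma Mx_succ (ws : List Nat) (k : Nat) :
    Mx ws (k + 1) = max (Mx ws k) (k + ws.getD k 0 + 1) := by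
  rw [Mx, Mx, List.range_succ, List.foldl_append]; rfl

lemma le_Mx (ws : List Nat) (k : Nat) : k ≤ Mx ws k := by
  induction k with
  | zero => simp [Mx]
  | succ k ih => rw [Mx_succ]; omega

lemma bound_Mx (ws : List Nat) {k i : Nat} (h : i < k) : i + ws.getD i 0 + 1 ≤ Mx ws k :=
  (PySem.List.le_foldl_max_nat (List.range k) (fun i => i + ws.getD i 0 + 1) 0).2 i
    (List.mem_range.mpr h)

lemma P_zero (ws : List Nat) {k j : Nat} (h : Mx ws k ≤ j) : P ws k j = 0 := by
  rw [P]
  refine Finset.sum_eq_zero (fun i hi => ?_)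
  have := bound_Mx ws (List.mem_range.mp (by simpa using hi) : i < k)
  simp only [if_neg (by omega : ¬ j ≤ i + ws.getD i 0)]

-- value model: after k cards, slot j holds cnt j (finished card) or the partial sum P k j
def vmodel (ws : List Nat) (k j : Nat) : Int := if j < k then cnt ws j else P ws k j

-- item-list model of A's dict after k cards: keys 0, 1, …, Mx ws k − 1 in insertion order
def mdl (ws : List Nat) (k : Nat) : List (Int × Int) :=
  (List.range (Mx ws k)).map (fun (j : Nat) => ((j : Int), vmodel ws k j))

-- ---- generic facts about dicts whose items list is an indexed range ----

lemma getD_model (score : PySem.Dict Int Int) (M : Nat) (f : Nat → Int)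
    (h : score.items = (List.range M).map (fun (j : Nat) => ((j : Int), f j))) (j : Nat) :
    score.getD (j : Int) 0 = if j < M then f j else 0 := by
  have hkeys : score.keys = (List.range M).map (fun (j : Nat) => (j : Int)) := by
    show score.items.map Prod.fst = _
    rw [h, List.map_map]; rfl
  have hnd : score.keys.Nodup := by
    rw [hkeys]
    exact (List.nodup_range).map (fun a b hab => by exact_mod_cast hab)
  by_cases hj : j < M
  · rw [if_pos hj]
    exact PySem.Dict.getD_of_mem_items score
      (by rw [h]; exact List.mem_map.mpr ⟨j, List.mem_range.mpr hj, rfl⟩) hnd 0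
  · rw [if_neg hj]
    refine PySem.Dict.getD_of_not_contains score 0 ?_
    rw [PySem.Dict.contains_eq_decide_mem_keys, hkeys]
    simp only [decide_eq_false_iff_not, List.mem_map, List.mem_range]
    rintro ⟨j', hj', hj'e⟩
    have : j' = j := by exact_mod_cast hj'e
    omega

lemma items_insert_model (score : PySem.Dict Int Int) (M : Nat) (f : Nat → Int)
    (h : score.items = (List.range M).map (fun (j : Nat) => ((j : Int), f j)))
    (j0 : Nat) (hj0 : j0 ≤ M) (v : Int) :
    (score.insert (j0 : Int) v).items =
      (List.range (max M (j0 + 1))).map (fun (j : Nat) => ((j : Int), if j = j0 then v else f j)) := by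
  have hkeys : score.keys = (List.range M).map (fun (j : Nat) => (j : Int)) := by
    show score.items.map Prod.fst = _
    rw [h, List.map_map]; rfl
  by_cases hj : j0 < M
  · have hc : score.contains (j0 : Int) = true := by
      rw [PySem.Dict.contains_eq_decide_mem_keys, hkeys]
      simp only [decide_eq_true_eq, List.mem_map, List.mem_range]
      exact ⟨j0, hj, rfl⟩
    rw [PySem.Dict.items_insert_of_contains score v hc, h, List.map_map]
    have hmax : max M (j0 + 1) = M := by omega
    rw [hmax]
    refine List.map_congr_left (fun j hj' => ?_)
    by_cases he : j = j0
    · subst he; simp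
    · have : ((j : Int) == (j0 : Int)) = false := by
        simp only [beq_eq_false_iff_ne, ne_eq, Int.natCast_inj]; exact he
      simp [Function.comp, this, he]
  · have hM : j0 = M := by omega
    have hc : score.contains (j0 : Int) = false := by
      rw [PySem.Dict.contains_eq_decide_mem_keys, hkeys]
      simp only [decide_eq_false_iff_not, List.mem_map, List.mem_range]
      rintro ⟨j', hj', hj'e⟩
      have : j' = j0 := by exact_mod_cast hj'e
      omega
    rw [PySem.Dict.items_insert_of_not_contains score v hc, h]
    have hmax : max M (j0 + 1) = M + 1 := by omega
    rw [hmax, List.range_succ, List.map_append]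
    congr 1
    · refine List.map_congr_left (fun j hj' => ?_)
      have hjM := List.mem_range.mp hj'
      have : j ≠ j0 := by omega
      simp [this]
    · simp [hM]

-- ---- A's inner loop against the model ----

lemma inner_fold (k M1 : Nat) (g : Nat → Int) (hk : k < M1) (m : Nat)
    (score : PySem.Dict Int Int)
    (h : score.items = (List.range M1).map (fun (j : Nat) => ((j : Int), g j))) :
    ((List.range m).foldl
      (fun sc t => sc.insert ((k + t + 1 : Nat) : Int)
        (sc.getD ((k + t + 1 : Nat) : Int) 0 + sc.getD (k : Int) 0)) score).items =
      (List.range (max M1 (k + 1 + m))).map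
        (fun (j : Nat) => ((j : Int),
          (if j < M1 then g j else 0) + (if k + 1 ≤ j ∧ j ≤ k + m then g k else 0))) := by
  induction m with
  | zero =>
    rw [List.range_zero, List.foldl_nil, h]
    have : max M1 (k + 1 + 0) = M1 := by omega
    rw [this]
    refine List.map_congr_left (fun j hj => ?_)
    have hjM := List.mem_range.mp hj
    simp [hjM]
  | succ m ih =>
    rw [List.range_succ, List.foldl_append, List.foldl_cons, List.foldl_nil]
    set M2 := max M1 (k + 1 + m) with hM2
    set h2 : Nat → Int := fun j => (if j < M1 then g j else 0) + (if k + 1 ≤ j ∧ j ≤ k + m then g k else 0) with hh2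
    have hgk : h2 k = g k := by simp [hh2, hk]
    have hgd1 := getD_model _ M2 h2 ih (k + m + 1)
    have hgd2 := getD_model _ M2 h2 ih k
    have hkM2 : k < M2 := by omega
    rw [if_pos hkM2, hgk] at hgd2
    rw [hgd1, hgd2,
      items_insert_model _ M2 h2 ih (k + m + 1) (by omega)
        ((if k + m + 1 < M2 then h2 (k + m + 1) else 0) + g k)]
    have hmax : max M2 (k + m + 1 + 1) = max M1 (k + 1 + (m + 1)) := by omega
    rw [hmax]
    refine List.map_congr_left (fun j hj => ?_)
    by_cases he : j = k + m + 1
    · subst he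
      simp only [hh2]
      have h2' : (k + 1 ≤ k + m + 1 ∧ k + m + 1 ≤ k + m + 1) := by omega
      by_cases hlt : k + m + 1 < M2
      · simp [hlt, h2']
      · have : ¬ (k + m + 1 < M1) := by omega
        simp [hlt, h2', this]
    · rw [if_neg he]
      simp only [hh2]
      have : (k + 1 ≤ j ∧ j ≤ k + m) ↔ (k + 1 ≤ j ∧ j ≤ k + (m + 1)) := by omega
      simp only [this]

lemma aInner_model (k M1 : Nat) (g : Nat → Int) (hk : k < M1) (m : Nat)
    (score : PySem.Dict Int Int)
    (h : score.items = (List.range M1).map (fun (j : Nat) => ((j : Int), g j))) :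
    (aInner k (m : Int) score).items =
      (List.range (max M1 (k + 1 + m))).map
        (fun (j : Nat) => ((j : Int),
          (if j < M1 then g j else 0) + (if k + 1 ≤ j ∧ j ≤ k + m then g k else 0))) := by
  rw [aInner, PySem.List.pyRange_zero_natCast, List.foldl_map]
  have hfun : (fun (sc : PySem.Dict Int Int) (t : Nat) =>
        sc.insert ((k : Int) + (t : Int) + 1) (sc.getD ((k : Int) + (t : Int) + 1) 0 + sc.getD (k : Int) 0))
      = (fun (sc : PySem.Dict Int Int) (t : Nat) =>
        sc.insert ((k + t + 1 : Nat) : Int) (sc.getD ((k + t + 1 : Nat) : Int) 0 + sc.getD (k : Int) 0)) := by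
    funext sc t; push_cast; rfl
  rw [hfun]
  exact inner_fold k M1 g hk m score h

-- ---- A's outer loop against the model ----

lemma aLoop_model (cs : List (List Int × List Int)) : ∀ (rest : List (List Int × List Int))
    (k : Nat) (score : PySem.Dict Int Int),
    rest = cs.drop k → k ≤ cs.length → score.items = mdl (cs.map wCount) k →
    (aLoop score k rest).items = mdl (cs.map wCount) cs.length := by
  intro rest
  induction rest with
  | nil =>
    intro k score hrest hk hitems
    have : cs.length ≤ k := List.drop_eq_nil_iff.mp hrest.symm
    have : k = cs.length := by omega
    rw [aLoop, ← this]; exact hitems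
  | cons c rest ih =>
    intro k score hrest hk hitems
    set ws := cs.map wCount with hws
    have hklt : k < cs.length := by
      by_contra hc
      rw [List.drop_eq_nil_iff.mpr (by omega)] at hrest
      exact absurd hrest (by simp)
    have hck : cs[k]? = some c := by
      have := List.getElem?_drop (xs := cs) (i := k) (j := 0)
      rw [← hrest] at this
      simpa using this.symm
    have hwk : ws.getD k 0 = wCount c := by
      rw [hws, List.getD_eq_getElem?_getD, List.getElem?_map, hck]; rfl
    have hrest' : rest = cs.drop (k + 1) := by
      have : (c :: rest).drop 1 = (cs.drop k).drop 1 := by rw [hrest]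
      simpa [List.drop_drop] using this
    rw [aLoop]
    -- the `score[i] += 1` step
    have hgd := getD_model score (Mx ws k) (vmodel ws k) hitems k
    have hlek := le_Mx ws k
    have hins := items_insert_model score (Mx ws k) (vmodel ws k) hitems k hlek (score.getD (k:Int) 0 + 1)
    have hval : score.getD (k:Int) 0 + 1 = cnt ws k := by
      rw [hgd, cnt_eq]
      by_cases hkM : k < Mx ws k
      · rw [if_pos hkM, vmodel, if_neg (by omega)]; ring
      · rw [if_neg hkM, P_zero ws (by omega)]; ring
    rw [hval] at hins
    -- the inner loop
    have hinner := aInner_model k (max (Mx ws k) (k+1)) (fun j => if j = k then cnt ws k else vmodel ws k j)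
      (by omega) (wCount c) _ hins
    -- the resulting items match the model at k+1
    have hm : (aInner k ((wCount c : Nat) : Int) (score.insert (k : Int) (score.getD (k : Int) 0 + 1))).items
        = mdl ws (k + 1) := by
      rw [hval, hinner, mdl]
      beta_reduce
      have hMx : max (max (Mx ws k) (k+1)) (k + 1 + wCount c) = Mx ws (k+1) := by
        rw [Mx_succ, hwk]; omega
      rw [hMx]
      refine List.map_congr_left (fun j hj => ?_)
      refine congrArg _ ?_
      by_cases h1 : j < k
      · have : j < max (Mx ws k) (k+1) := by omega
        rw [if_pos this, if_neg (by omega : ¬ j = k), vmodel, if_pos h1,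
          if_neg (by omega : ¬ (k+1 ≤ j ∧ j ≤ k + wCount c)), vmodel, if_pos (by omega)]
        ring
      · by_cases h2 : j = k
        · subst h2
          rw [if_pos (by omega), if_pos rfl, if_neg (by omega : ¬ (j+1 ≤ j ∧ j ≤ j + wCount c)),
            vmodel, if_pos (by omega)]
          ring
        · -- j > k
          simp only [if_neg (show ¬ j = k by omega), vmodel,
            if_neg (show ¬ j < k by omega), if_neg (show ¬ j < k + 1 by omega), P_succ, hwk]
          by_cases h3 : j < max (Mx ws k) (k+1)
          · rw [if_pos h3]
            by_cases h4 : j ≤ k + wCount c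
            · simp [h4, (show k + 1 ≤ j ∧ j ≤ k + wCount c by omega)]
            · rw [if_neg h4, if_neg (by omega : ¬ (k + 1 ≤ j ∧ j ≤ k + wCount c))]
          · rw [if_neg h3, P_zero ws (by omega : Mx ws k ≤ j)]
            by_cases h4 : j ≤ k + wCount c
            · simp [h4, (show k + 1 ≤ j ∧ j ≤ k + wCount c by omega)]
            · rw [if_neg h4, if_neg (by omega : ¬ (k + 1 ≤ j ∧ j ≤ k + wCount c))]
    rw [← hws] at *
    exact ih (k+1) _ hrest' (by omega) hm

lemma part_2_eq_sum (cs : List (List Int × List Int)) :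
    part_2 cs = ∑ j ∈ Finset.range cs.length, cnt (cs.map wCount) j := by
  set ws := cs.map wCount with hws
  have hempty : (PySem.Dict.empty : PySem.Dict Int Int).items = mdl ws 0 := by
    simp [mdl, Mx, PySem.Dict.empty]
  have h := aLoop_model cs cs 0 PySem.Dict.empty rfl (by omega) hempty
  rw [part_2]
  rw [h, mdl, List.filter_map]
  set n := cs.length with hn
  have hM : n ≤ Mx ws n := le_Mx ws n
  have hfil : ((List.range (Mx ws n)).filter
      ((fun kv => decide (kv.1 < (n : Int))) ∘ (fun (j : Nat) => ((j : Int), vmodel ws n j))))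
      = List.range n := by
    have hsplit : List.range (Mx ws n) = List.range n ++ (List.range (Mx ws n - n)).map (n + ·) := by
      rw [← List.range_add, Nat.add_sub_cancel' hM]
    rw [hsplit, List.filter_append]
    have h1 : (List.range n).filter
        ((fun kv => decide (kv.1 < (n : Int))) ∘ (fun (j : Nat) => ((j : Int), vmodel ws n j)))
        = List.range n := by
      refine List.filter_eq_self.mpr (fun j hj => ?_)
      have := List.mem_range.mp hj
      simp only [Function.comp]
      exact decide_eq_true (by exact_mod_cast this)
    have h2 : ((List.range (Mx ws n - n)).map (n + ·)).filter
        ((fun kv => decide (kv.1 < (n : Int))) ∘ (fun (j : Nat) => ((j : Int), vmodel ws n j)))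
        = [] := by
      refine List.filter_eq_nil_iff.mpr (fun j hj => ?_)
      simp only [List.mem_map] at hj
      obtain ⟨t, _, rfl⟩ := hj
      simp only [Function.comp, decide_eq_true_eq, not_lt]
      exact_mod_cast Nat.le_add_right n t
    rw [h1, h2, List.append_nil]
  rw [hfil, List.map_map]
  have : ((List.range n).map ((fun kv => kv.2) ∘ (fun (j : Nat) => ((j : Int), vmodel ws n j))))
      = (List.range n).map (cnt ws) := by
    refine List.map_congr_left (fun j hj => ?_)
    have := List.mem_range.mp hj
    simp [vmodel, this]
  rw [this]
  rfl

-- ---- B's loop against the model ----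

lemma sum_if_eq (s : Finset Nat) (a : Nat) (x : Int) (f : Nat → Int) :
    ∑ t ∈ s, (if t = a then x else f t) = (∑ t ∈ s, f t) + (if a ∈ s then x - f a else 0) := by
  by_cases ha : a ∈ s
  · rw [if_pos ha, ← Finset.add_sum_erase s _ ha, ← Finset.add_sum_erase s f ha, if_pos rfl]
    have : ∑ t ∈ s.erase a, (if t = a then x else f t) = ∑ t ∈ s.erase a, f t :=
      Finset.sum_congr rfl (fun t ht => if_neg (Finset.ne_of_mem_erase ht))
    rw [this]; ring
  · rw [if_neg ha]
    have : ∑ t ∈ s, (if t = a then x else f t) = ∑ t ∈ s, f t :=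
      Finset.sum_congr rfl (fun t ht => if_neg (fun he => ha (by rwa [he] at ht)))
    rw [this]; ring

lemma getD_set (l : List Int) (a t : Nat) (x : Int) (ha : a < l.length) :
    (l.set a x).getD t 0 = if t = a then x else l.getD t 0 := by
  rw [List.getD_eq_getElem?_getD, List.getD_eq_getElem?_getD, List.getElem?_set]
  by_cases h : t = a
  · subst h; rw [if_pos rfl, if_pos rfl, if_pos ha]; rfl
  · rw [if_neg h, if_neg (fun he => h he.symm)]

lemma sum_getD_set (l : List Int) (a : Nat) (x : Int) (s : Finset Nat) (ha : a < l.length) :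
    ∑ t ∈ s, (l.set a x).getD t 0
      = (∑ t ∈ s, l.getD t 0) + (if a ∈ s then x - l.getD a 0 else 0) := by
  rw [Finset.sum_congr rfl (fun t _ => getD_set l a t x ha), sum_if_eq]

lemma bLoop_spec (cs : List (List Int × List Int)) : ∀ (rest : List (List Int × List Int))
    (k : Nat) (diff : List Int) (run total : Int),
    rest = cs.drop k → k ≤ cs.length →
    diff.length = cs.length + 1 →
    total = (∑ j ∈ Finset.range k, cnt (cs.map wCount) j) →
    (∀ j, k ≤ j → j < cs.length →
      run + ∑ t ∈ Finset.Icc k j, diff.getD t 0 = P (cs.map wCount) k j) →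
    bLoop diff run total k cs.length rest
      = ∑ j ∈ Finset.range cs.length, cnt (cs.map wCount) j := by
  intro rest
  induction rest with
  | nil =>
    intro k diff run total hrest hk hlen htotal hrun
    have : cs.length ≤ k := List.drop_eq_nil_iff.mp hrest.symm
    have hkn : k = cs.length := by omega
    rw [bLoop, htotal, hkn]
  | cons c rest ih =>
    intro k diff run total hrest hk hlen htotal hrun
    set ws := cs.map wCount with hws
    have hklt : k < cs.length := by
      by_contra hc
      rw [List.drop_eq_nil_iff.mpr (by omega)] at hrest
      exact absurd hrest (by simp)
    have hck : cs[k]? = some c := by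
      have := List.getElem?_drop (xs := cs) (i := k) (j := 0)
      rw [← hrest] at this
      simpa using this.symm
    have hwk : ws.getD k 0 = wCount c := by
      rw [hws, List.getD_eq_getElem?_getD, List.getElem?_map, hck]; rfl
    have hrest' : rest = cs.drop (k + 1) := by
      have : (c :: rest).drop 1 = (cs.drop k).drop 1 := by rw [hrest]
      simpa [List.drop_drop] using this
    rw [bLoop]
    set n := cs.length with hn
    -- the running prefix sum at position k is P ws k k
    have hrunk : run + diff.getD k 0 = P ws k k := by
      have := hrun k (le_refl k) hklt
      simpa using this
    have hcv : 1 + (run + diff.getD k 0) = cnt ws k := by rw [hrunk, ← cnt_eq]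
    -- split the old invariant sum at its first element
    have hsplit : ∀ j, k + 1 ≤ j → j < n →
        (run + diff.getD k 0) + ∑ t ∈ Finset.Icc (k+1) j, diff.getD t 0 = P ws k j := by
      intro j hj1 hj2
      have h0 := hrun j (by omega) hj2
      rw [Finset.Icc_eq_cons_Ioc (by omega : k ≤ j), Finset.sum_cons,
        ← Finset.Icc_add_one_left_eq_Ioc] at h0
      calc (run + diff.getD k 0) + ∑ t ∈ Finset.Icc (k+1) j, diff.getD t 0
          = run + (diff.getD k 0 + ∑ t ∈ Finset.Icc (k+1) j, diff.getD t 0) := by ring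
        _ = P ws k j := h0
    simp only []
    refine ih (k+1) _ _ _ hrest' (by omega) ?_ ?_ ?_
    · -- length is preserved
      by_cases hlo : k + 1 < min n (k + wCount c + 1)
      · simp [hlo, hlen]
      · simp [hlo, hlen]
    · -- total accumulates cnt ws k
      rw [htotal, Finset.sum_range_succ, hcv]
    · -- run invariant at k+1
      intro j hj1 hj2
      have hgoalP : P ws (k+1) j = P ws k j + (if j ≤ k + wCount c then cnt ws k else 0) := by
        rw [P_succ, hwk]
      by_cases hlo : k + 1 < min n (k + wCount c + 1)
      · -- a range update was posted at [k+1, min n (k+wc+1))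
        have hlolen : k + 1 < diff.length := by omega
        have hhilen : min n (k + wCount c + 1) < ((diff.set (k+1) (diff.getD (k+1) 0 + (1 + (run + diff.getD k 0))))).length := by
          rw [List.length_set]; omega
        rw [if_pos hlo]
        set cv := 1 + (run + diff.getD k 0) with hcvdef
        set d2 := diff.set (k+1) (diff.getD (k+1) 0 + cv) with hd2
        rw [sum_getD_set d2 _ _ _ hhilen]
        rw [hd2, sum_getD_set diff _ _ _ hlolen]
        have hmem1 : k + 1 ∈ Finset.Icc (k+1) j := Finset.mem_Icc.mpr (by omega)
        rw [if_pos hmem1]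
        have hne : min n (k + wCount c + 1) ≠ k + 1 := by omega
        have hd2hi : d2.getD (min n (k + wCount c + 1)) 0 = diff.getD (min n (k + wCount c + 1)) 0 := by
          rw [hd2, getD_set diff _ _ _ hlolen, if_neg hne]
        rw [hd2hi]
        have hs := hsplit j hj1 hj2
        by_cases hhi : min n (k + wCount c + 1) ≤ j
        · have hmem2 : min n (k + wCount c + 1) ∈ Finset.Icc (k+1) j := Finset.mem_Icc.mpr (by omega)
          rw [if_pos hmem2, hgoalP, if_neg (by omega : ¬ j ≤ k + wCount c), ← hs]
          ring
        · have hmem2 : min n (k + wCount c + 1) ∉ Finset.Icc (k+1) j := by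
            intro hm; exact hhi (Finset.mem_Icc.mp hm).2
          rw [if_neg hmem2, hgoalP, if_pos (by omega : j ≤ k + wCount c), ← hs, ← hcv]
          ring
      · -- no update: the affected range [k+1, min n (k+wc+1)) is empty
        rw [if_neg hlo]
        have : ¬ j ≤ k + wCount c := by omega
        rw [hgoalP, if_neg this, add_zero, ← hsplit j hj1 hj2]

lemma part_2_alt_eq_sum (cs : List (List Int × List Int)) :
    part_2_alt cs = ∑ j ∈ Finset.range cs.length, cnt (cs.map wCount) j := by
  rw [part_2_alt]
  refine bLoop_spec cs cs 0 _ 0 0 rfl (by omega) (by simp) (by simp) ?_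
  intro j h0 hj
  have hall : ∀ t ∈ Finset.Icc 0 j, (List.replicate (cs.length + 1) (0:Int)).getD t 0 = 0 := by
    intro t ht
    rw [List.getD_eq_getElem?_getD, List.getElem?_replicate]
    split <;> rfl
  rw [Finset.sum_congr rfl hall]
  simp [P]

-- ===== VERDICT (by name: the statement is the Claim_ definition above) =====
theorem part_2_spec : Claim_equal_part_2 := by
  intro cards _
  show part_2 cards = part_2_alt cards
  rw [part_2_eq_sum, part_2_alt_eq_sum]
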